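-- pv_equiv track=rewrite | github.com/Garmelon/evering | evering/parser.py | split_header_and_rest
-- ===== SOURCE A (Python) =====
-- from typing import Any, Dict, List, Optional, Tuple, Union
--
-- def split_header_and_rest(text: str) -> Tuple[List[str], List[str]]:
--     lines = text.splitlines()
--
--     header: List[str] = []
--     rest: List[str] = []
--
--     in_header = True
--     for line in lines:
--         if not in_header:
--             rest.append(line)
--         elif len(line) >= 3 and line == "=" * len(line):
--             # The header is separated from the rest of the file by
--             # a line that contains 3 or more "=" characters and
--             # nothing else.
--             in_header = False
--         else:
--             header.append(line)
--
--     return header, rest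
-- ===== SOURCE B (Python) =====
-- def split_header_and_rest(text):
--     lines = text.splitlines()
--     idx = next((i for i, line in enumerate(lines)
--                 if len(line) >= 3 and line == "=" * len(line)), None)
--     if idx is None:
--         return lines, []
--     return lines[:idx], lines[idx + 1:]
-- ===== Notes on version B (the rewrite author's own statement) =====
-- stated objective: simpler
-- what changed: B finds the index of the first separator line and returns two slices, instead of A's boolean-flag loop that appends lines one by one to two accumulators.
import Mathlib
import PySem

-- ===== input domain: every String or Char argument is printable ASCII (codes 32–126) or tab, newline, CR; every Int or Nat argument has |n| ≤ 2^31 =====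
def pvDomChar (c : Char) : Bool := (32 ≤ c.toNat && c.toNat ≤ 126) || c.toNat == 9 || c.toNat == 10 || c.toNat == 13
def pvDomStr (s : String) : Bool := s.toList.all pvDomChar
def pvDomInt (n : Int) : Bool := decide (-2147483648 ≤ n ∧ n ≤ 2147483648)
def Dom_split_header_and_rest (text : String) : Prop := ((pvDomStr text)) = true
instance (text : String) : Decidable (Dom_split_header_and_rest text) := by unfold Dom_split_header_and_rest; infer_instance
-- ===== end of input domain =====

-- B replaces A's boolean-flag accumulator loop by find-first-separator-index-then-slice (simpler decomposition).

-- ===== PORT A =====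
-- loop body of A's for-loop: state (header, rest, in_header)
def pvLoopA (st : List String × List String × Bool) (line : String) :
    List String × List String × Bool :=
  if !st.2.2 then (st.1, st.2.1 ++ [line], st.2.2)
  else if 3 ≤ line.toList.length ∧ line.toList = List.replicate line.toList.length '=' then
    (st.1, st.2.1, false)
  else (st.1 ++ [line], st.2.1, st.2.2)

def split_header_and_rest (text : String) : List String × List String :=
  let lines := PySem.Str.splitlines text
  let st := lines.foldl pvLoopA ([], [], true)
  (st.1, st.2.1)

-- ===== PORT B =====
-- B's separator predicate: len(line) >= 3 and line == "=" * len(line)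
def pvSep (line : String) : Bool :=
  decide (3 ≤ line.toList.length) && decide (line.toList = List.replicate line.toList.length '=')

def split_header_and_rest_alt (text : String) : List String × List String :=
  let lines := PySem.Str.splitlines text
  match lines.findIdx? pvSep with
  | none => (lines, [])
  | some i => (lines.take i, lines.drop (i + 1))

-- ===== PRECONDITION & SPEC =====
def Spec_split_header_and_rest (text : String) (out : List String × List String) : Prop := out = split_header_and_rest_alt text
instance (text : String) (out : List String × List String) : Decidable (Spec_split_header_and_rest text out) := by unfold Spec_split_header_and_rest; infer_instance

-- ===== CLAIM (what is proved, stated in full; the proofs are below) =====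
def Claim_equal_split_header_and_rest : Prop := ∀ (text : String), Dom_split_header_and_rest text → Spec_split_header_and_rest text (split_header_and_rest text)

-- ===== LEMMAS AND PROOFS =====

-- once in_header is false, A's loop just appends every remaining line to rest
theorem pvLoopA_false (lines : List String) (h r : List String) :
    lines.foldl pvLoopA (h, r, false) = (h, r ++ lines, false) := by
  induction lines generalizing r with
  | nil => simp
  | cons l ls ih => simp [pvLoopA, ih]

-- A's loop in the in_header state computes B's find-then-slice result
theorem pvLoopA_true (lines : List String) (h : List String) :
    lines.foldl pvLoopA (h, [], true) =
      match lines.findIdx? pvSep with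
      | none => (h ++ lines, [], true)
      | some i => (h ++ lines.take i, lines.drop (i + 1), false) := by
  induction lines generalizing h with
  | nil => simp
  | cons l ls ih =>
    rw [List.foldl_cons]
    by_cases hp : pvSep l = true
    · have hp' : 3 ≤ l.toList.length ∧ l.toList = List.replicate l.toList.length '=' := by
        simpa [pvSep] using hp
      have e1 : pvLoopA (h, [], true) l = (h, [], false) := by
        simp only [pvLoopA, Bool.not_true, Bool.false_eq_true, if_false, if_pos hp']
      rw [e1, pvLoopA_false, List.findIdx?_cons, hp]
      simp
    · have hp' : ¬ (3 ≤ l.toList.length ∧ l.toList = List.replicate l.toList.length '=') := by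
        simpa [pvSep] using hp
      have hpf : pvSep l = false := by simpa using hp
      have e1 : pvLoopA (h, [], true) l = (h ++ [l], [], true) := by
        simp only [pvLoopA, Bool.not_true, Bool.false_eq_true, if_false, if_neg hp']
      rw [e1, ih (h ++ [l]), List.findIdx?_cons, hpf]
      cases hf : ls.findIdx? pvSep with
      | none => simp
      | some i => simp

-- ===== VERDICT (by name: the statement is the Claim_ definition above) =====
theorem split_header_and_rest_spec : Claim_equal_split_header_and_rest := by
  intro text _
  simp only [Spec_split_header_and_rest, split_header_and_rest, split_header_and_rest_alt]
  rw [pvLoopA_true (PySem.Str.splitlines text) []]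
  cases hf : (PySem.Str.splitlines text).findIdx? pvSep <;> simp
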